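-- pv_equiv track=rewrite | github.com/deeev-sb/til-2022.02 | Algorithm/Programmers/Level1/solution(33).py | solution
-- ===== SOURCE A (Python) =====
-- def solution(answers):
--     answer = []
--     student1=[1, 2, 3, 4, 5]
--     student2=[2, 1, 2, 3, 2, 4, 2, 5]
--     student3=[3, 3, 1, 1, 2, 2, 4, 4, 5, 5]
--     count1 , count2, count3 = 0, 0, 0
--
--     for i in range(len(answers)):
--         j = i%len(student1)
--         if answers[i] == student1[j]:
--             count1 += 1
--
--     for i in range(len(answers)):
--         j = i%len(student2)
--         if answers[i] == student2[j]:
--             count2 += 1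
--
--     for i in range(len(answers)):
--         j = i%len(student3)
--         if answers[i] == student3[j]:
--             count3 += 1
--
--     max_answer = max(count1, count2, count3)
--
--     if count1 == max_answer:
--         answer.append(1)
--     if count2 == max_answer:
--         answer.append(2)
--     if count3 == max_answer:
--         answer.append(3)
--
--     return answer
-- ===== SOURCE B (Python) =====
-- def solution(answers):
--     patterns = [[1, 2, 3, 4, 5],
--                 [2, 1, 2, 3, 2, 4, 2, 5],
--                 [3, 3, 1, 1, 2, 2, 4, 4, 5, 5]]
--     # One pass builds a frequency table keyed by (position mod 40, answer);
--     # 40 = lcm(5, 8, 10), so each pattern's value is fixed on each residue class.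
--     freq = {}
--     for i, a in enumerate(answers):
--         key = (i % 40, a)
--         freq[key] = freq.get(key, 0) + 1
--     def score(pat):
--         return sum(freq.get((r, pat[r % len(pat)]), 0) for r in range(40))
--     counts = [score(p) for p in patterns]
--     best = max(counts)
--     return [k for k, c in enumerate(counts, 1) if c == best]
-- ===== Notes on version B (the rewrite author's own statement) =====
-- stated objective: alternative
-- what changed: Instead of scanning answers once per student and comparing each element against the cyclic pattern, B builds in one pass a frequency dictionary keyed by (index mod 40, answer) (40 = lcm of the pattern lengths) and obtains each student's score as a sum of 40 dictionary lookups; the per-element loop never touches the patterns.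
import Mathlib
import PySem

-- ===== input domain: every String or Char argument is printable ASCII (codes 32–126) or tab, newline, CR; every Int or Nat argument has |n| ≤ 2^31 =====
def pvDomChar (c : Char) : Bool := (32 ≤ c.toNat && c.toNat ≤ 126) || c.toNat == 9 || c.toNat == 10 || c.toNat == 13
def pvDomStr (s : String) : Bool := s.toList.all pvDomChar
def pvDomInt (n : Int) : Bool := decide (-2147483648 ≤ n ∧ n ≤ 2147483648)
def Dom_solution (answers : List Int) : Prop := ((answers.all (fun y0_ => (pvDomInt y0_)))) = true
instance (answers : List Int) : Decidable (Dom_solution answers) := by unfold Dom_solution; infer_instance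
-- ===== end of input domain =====

-- B replaces A's three per-student comparison scans by one pass building a frequency
-- dictionary keyed by (index mod 40, answer) (40 = lcm of the pattern lengths) and
-- scores each student with 40 dictionary lookups ("alternative").

-- ===== PORT A =====
def solution (answers : List Int) : List Int :=
  let student1 : List Int := [1, 2, 3, 4, 5]
  let student2 : List Int := [2, 1, 2, 3, 2, 4, 2, 5]
  let student3 : List Int := [3, 3, 1, 1, 2, 2, 4, 4, 5, 5]
  let count1 : Int := (PySem.List.pyRange 0 (answers.length : Int) 1).foldl
    (fun c i => if PySem.List.pyGetD answers i 0
        == PySem.List.pyGetD student1 (PySem.Int.mod i (student1.length : Int)) 0 then c + 1 else c) 0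
  let count2 : Int := (PySem.List.pyRange 0 (answers.length : Int) 1).foldl
    (fun c i => if PySem.List.pyGetD answers i 0
        == PySem.List.pyGetD student2 (PySem.Int.mod i (student2.length : Int)) 0 then c + 1 else c) 0
  let count3 : Int := (PySem.List.pyRange 0 (answers.length : Int) 1).foldl
    (fun c i => if PySem.List.pyGetD answers i 0
        == PySem.List.pyGetD student3 (PySem.Int.mod i (student3.length : Int)) 0 then c + 1 else c) 0
  let maxAnswer := max count1 (max count2 count3)
  let answer : List Int := []
  let answer := if count1 == maxAnswer then answer ++ [1] else answer
  let answer := if count2 == maxAnswer then answer ++ [2] else answer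
  let answer := if count3 == maxAnswer then answer ++ [3] else answer
  answer

-- ===== PORT B =====
def solution_alt (answers : List Int) : List Int :=
  let patterns : List (List Int) :=
    [[1, 2, 3, 4, 5], [2, 1, 2, 3, 2, 4, 2, 5], [3, 3, 1, 1, 2, 2, 4, 4, 5, 5]]
  let freq : PySem.Dict (Int × Int) Int :=
    (PySem.List.enumerate answers 0).foldl
      (fun d ia =>
        let key := (PySem.Int.mod ia.1 40, ia.2)
        d.insert key (d.getD key 0 + 1))
      PySem.Dict.empty
  let score : List Int → Int := fun pat =>
    ((PySem.List.pyRange 0 40 1).map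
      (fun r => freq.getD (r, PySem.List.pyGetD pat (PySem.Int.mod r (pat.length : Int)) 0) 0)).sum
  let counts := patterns.map score
  let best := (PySem.List.max? counts (fun y => y)).getD 0   -- max(counts); counts has 3 elements, getD 0 is a totality guard
  ((PySem.List.enumerate counts 1).filter (fun kc => kc.2 == best)).map (fun kc => kc.1)

-- ===== PRECONDITION & SPEC =====
def Spec_solution (answers : List Int) (out : List Int) : Prop := out = solution_alt answers
instance (answers : List Int) (out : List Int) : Decidable (Spec_solution answers out) := by unfold Spec_solution; infer_instance

-- ===== CLAIM (what is proved, stated in full; the proofs are below) =====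
def Claim_equal_solution : Prop := ∀ (answers : List Int), Dom_solution answers → Spec_solution answers (solution answers)

-- ===== LEMMAS AND PROOFS =====

theorem sum_ind_zero (pv : Int → Int) (m x : Int) (rs : List Int) (hm : m ∉ rs) :
    (rs.map (fun r => if ((m, x) : Int × Int) = (r, pv r) then (1 : Nat) else 0)).sum = 0 := by
  induction rs with
  | nil => simp
  | cons r rs ih =>
      simp only [List.mem_cons, not_or] at hm
      rw [List.map_cons, List.sum_cons, ih hm.2, add_zero, if_neg]
      intro h
      exact hm.1 (congrArg Prod.fst h)

theorem sum_ind (pv : Int → Int) (m x : Int) (rs : List Int) (hnd : rs.Nodup) (hm : m ∈ rs) :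
    (rs.map (fun r => if ((m, x) : Int × Int) = (r, pv r) then (1 : Nat) else 0)).sum
      = if x = pv m then 1 else 0 := by
  induction rs with
  | nil => simp at hm
  | cons r rs ih =>
      simp only [List.nodup_cons] at hnd
      rcases List.mem_cons.mp hm with h | h
      · subst h
        rw [List.map_cons, List.sum_cons, sum_ind_zero pv m x rs hnd.1, add_zero]
        by_cases hx : x = pv m
        · rw [if_pos (by rw [hx]), if_pos hx]
        · rw [if_neg (fun h => hx (congrArg Prod.snd h)), if_neg hx]
      · have hne : m ≠ r := fun e => hnd.1 (e ▸ h)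
        rw [List.map_cons, List.sum_cons, ih hnd.2 h, if_neg (fun h => hne (congrArg Prod.fst h)),
          zero_add]

theorem sum_count_eq_countP (pv : Int → Int) (e : List (Int × Int))
    (he : ∀ p ∈ e, 0 ≤ p.1)
    (hper : ∀ i : Int, 0 ≤ i → pv (PySem.Int.mod i 40) = pv i) :
    ((PySem.List.pyRange 0 40 1).map
      (fun r => (e.map (fun ia => (PySem.Int.mod ia.1 40, ia.2))).count (r, pv r))).sum
      = e.countP (fun ia => ia.2 == pv ia.1) := by
  induction e with
  | nil => simp
  | cons x e ih =>
      have hx0 : 0 ≤ x.1 := he x (by simp)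
      have he' : ∀ p ∈ e, 0 ≤ p.1 := fun p hp => he p (by simp [hp])
      simp only [List.map_cons, List.count_cons, List.countP_cons, beq_iff_eq]
      rw [List.sum_map_add, ih he',
        sum_ind pv (PySem.Int.mod x.1 40) x.2 _ (PySem.List.nodup_pyRange_one 0 40)
          (PySem.List.mem_pyRange_one.mpr ⟨PySem.Int.mod_nonneg _ (by norm_num), PySem.Int.mod_lt _ (by norm_num)⟩),
        hper x.1 hx0]

theorem score_eq_count (answers pat : List Int) (hL : (pat.length : Int) ∣ 40) (hpos : pat ≠ []) :
    ((PySem.List.pyRange 0 40 1).map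
      (fun r => (((PySem.List.enumerate answers 0).foldl
          (fun d ia =>
            let key := (PySem.Int.mod ia.1 40, ia.2)
            d.insert key (d.getD key 0 + 1))
          (PySem.Dict.empty : PySem.Dict (Int × Int) Int))).getD
        (r, PySem.List.pyGetD pat (PySem.Int.mod r (pat.length : Int)) 0) 0)).sum
      = (PySem.List.pyRange 0 (answers.length : Int) 1).foldl
          (fun c i => if PySem.List.pyGetD answers i 0
              == PySem.List.pyGetD pat (PySem.Int.mod i (pat.length : Int)) 0 then c + 1 else c) 0 := by
  have hLpos : (0 : Int) < (pat.length : Int) := by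
    have := List.length_pos_iff.mpr hpos
    exact_mod_cast this
  have hfold : ((PySem.List.enumerate answers 0).foldl
      (fun d ia =>
        let key := (PySem.Int.mod ia.1 40, ia.2)
        d.insert key (d.getD key 0 + 1))
      (PySem.Dict.empty : PySem.Dict (Int × Int) Int))
      = ((PySem.List.enumerate answers 0).map (fun ia => (PySem.Int.mod ia.1 40, ia.2))).foldl
          (fun d k => d.insert k (d.getD k 0 + 1)) PySem.Dict.empty := by
    rw [List.foldl_map]
  rw [hfold]
  simp only [PySem.Dict.getD_foldl_insert_add_one, PySem.Dict.getD_empty, zero_add]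
  rw [show ((PySem.List.pyRange 0 40 1).map
        (fun r => (((PySem.List.enumerate answers 0).map (fun ia => (PySem.Int.mod ia.1 40, ia.2))).count
            (r, PySem.List.pyGetD pat (PySem.Int.mod r (pat.length : Int)) 0) : Int))).sum
      = (((PySem.List.pyRange 0 40 1).map
        (fun r => ((PySem.List.enumerate answers 0).map (fun ia => (PySem.Int.mod ia.1 40, ia.2))).count
            (r, PySem.List.pyGetD pat (PySem.Int.mod r (pat.length : Int)) 0))).sum : Int) from by
    rw [Nat.cast_list_sum, List.map_map]
    rfl]
  rw [sum_count_eq_countP (fun i => PySem.List.pyGetD pat (PySem.Int.mod i (pat.length : Int)) 0)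
      (PySem.List.enumerate answers 0)
      (by
        intro p hp
        rcases (PySem.List.mem_enumerate_iff _ _ _).mp hp with ⟨k, hk, rfl⟩
        simp)
      (by
        intro i hi
        have hmm : PySem.Int.mod (PySem.Int.mod i 40) (pat.length : Int)
            = PySem.Int.mod i (pat.length : Int) := by
          rw [PySem.Int.mod_eq_emod_of_pos hLpos, PySem.Int.mod_eq_emod_of_pos hLpos,
            PySem.Int.mod_eq_emod_of_pos (by norm_num : (0:Int) < 40)]
          exact Int.emod_emod_of_dvd i hL
        beta_reduce
        rw [hmm])]
  rw [PySem.List.foldl_if_add_one, zero_add]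
  rw [PySem.List.enumerate_eq_map_pyRange answers 0, List.countP_map]
  rfl


theorem solution_eq_alt (answers : List Int) : solution answers = solution_alt answers := by
  unfold solution solution_alt
  simp only [List.map_cons, List.map_nil]
  rw [score_eq_count answers [1,2,3,4,5] (by decide) (by decide),
    score_eq_count answers [2,1,2,3,2,4,2,5] (by decide) (by decide),
    score_eq_count answers [3,3,1,1,2,2,4,4,5,5] (by decide) (by decide)]
  rw [PySem.List.max?_id_cons]
  simp only [List.foldl_cons, List.foldl_nil, Option.getD_some,
    PySem.List.enumerate_cons, PySem.List.enumerate_nil, List.filter_cons, List.filter_nil, beq_iff_eq]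
  norm_num
  generalize (PySem.List.pyRange 0 (answers.length : Int) 1).foldl
      (fun c i => if PySem.List.pyGetD answers i 0
          = PySem.List.pyGetD [1,2,3,4,5] (i % 5) 0 then c + 1 else c) (0 : Int) = c1
  generalize (PySem.List.pyRange 0 (answers.length : Int) 1).foldl
      (fun c i => if PySem.List.pyGetD answers i 0
          = PySem.List.pyGetD [2,1,2,3,2,4,2,5] (i % 8) 0 then c + 1 else c) (0 : Int) = c2
  generalize (PySem.List.pyRange 0 (answers.length : Int) 1).foldl
      (fun c i => if PySem.List.pyGetD answers i 0
          = PySem.List.pyGetD [3,3,1,1,2,2,4,4,5,5] (i % 10) 0 then c + 1 else c) (0 : Int) = c3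
  have hc : (c2 ≤ c1 ∧ c3 ≤ c1) ↔ (c1 = max c1 (max c2 c3)) := by omega
  simp only [hc]
  set M := max c1 (max c2 c3) with hM
  by_cases h1 : c1 = M <;>
    by_cases h2 : c2 = M <;>
      by_cases h3 : c3 = M <;>
        simp [h1, h2, h3]

-- ===== VERDICT (by name: the statement is the Claim_ definition above) =====
theorem solution_spec : Claim_equal_solution := by
  intro answers _
  exact solution_eq_alt answers
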